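-- pv_equiv track=rewrite | github.com/justanindieguy/coding-minutes-problems | ArraysAndVectors/MinimumDifferencePy/main.py | get_minimum_pair_sort_sets
-- ===== SOURCE A (Python) =====
-- def get_minimum_pair_sort_sets(arr1, arr2):
--     all_values = arr1 + arr2
--     arr1_values = set(arr1)
--     arr2_values = set(arr2)
--
--     all_values.sort()
--
--     n = len(all_values)
--     minimum_pair = ()
--     minimum_diff = float("inf")
--     for i in range(n - 1):
--         curr_value = all_values[i]
--         next_value = all_values[i + 1]
--
--         if curr_value in arr1_values and next_value in arr2_values:
--             curr_diff = abs(curr_value - next_value)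
--
--             if curr_diff < minimum_diff:
--                 minimum_diff = curr_diff
--                 minimum_pair = (curr_value, next_value)
--
--     return minimum_pair
-- ===== SOURCE B (Python) =====
-- def _ceil_index(xs, a):
--     lo, hi = 0, len(xs)
--     while lo < hi:
--         mid = (lo + hi) // 2
--         if xs[mid] < a:
--             lo = mid + 1
--         else:
--             hi = mid
--     return lo
--
--
-- def get_minimum_pair_sort_sets(arr1, arr2):
--     arr2_sorted = sorted(arr2)
--     minimum_pair = ()
--     minimum_diff = None
--     for a in sorted(arr1):
--         idx = _ceil_index(arr2_sorted, a)
--         if idx < len(arr2_sorted):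
--             b = arr2_sorted[idx]
--             diff = b - a
--             if minimum_diff is None or diff < minimum_diff:
--                 minimum_diff = diff
--                 minimum_pair = (a, b)
--     return minimum_pair
-- ===== Notes on version B (the rewrite author's own statement) =====
-- stated objective: alternative
-- what changed: A sorts the merged arr1+arr2 and scans adjacent pairs filtered through two hash sets; B sorts each array separately and, for each element of sorted arr1, binary-searches sorted arr2 for its ceiling, keeping the first strict minimum of b-a.
-- outside the precondition, e.g. on get_minimum_pair_sort_sets([3], [1]): A returns (), B returns (); on get_minimum_pair_sort_sets([], []): A returns (), B returns ()
import Mathlib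
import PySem

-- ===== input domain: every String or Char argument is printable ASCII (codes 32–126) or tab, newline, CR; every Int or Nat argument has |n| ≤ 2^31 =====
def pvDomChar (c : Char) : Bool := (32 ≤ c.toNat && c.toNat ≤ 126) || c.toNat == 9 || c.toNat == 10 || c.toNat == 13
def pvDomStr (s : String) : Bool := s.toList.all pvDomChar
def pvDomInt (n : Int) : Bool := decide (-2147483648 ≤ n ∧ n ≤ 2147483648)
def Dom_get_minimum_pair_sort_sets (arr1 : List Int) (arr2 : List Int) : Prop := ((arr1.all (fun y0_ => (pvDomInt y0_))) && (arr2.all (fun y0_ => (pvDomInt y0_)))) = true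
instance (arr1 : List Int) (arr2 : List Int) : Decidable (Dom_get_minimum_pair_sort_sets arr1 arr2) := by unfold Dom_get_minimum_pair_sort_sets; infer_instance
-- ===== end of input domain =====

-- B replaces A's scan of adjacent pairs of the sorted merge by a sort of each array plus a
-- hand-written binary search (ceiling lookup) per element of arr1 — an alternative algorithm of
-- similar cost. Equivalence is proved on the inputs where A returns a pair at all (Pre_ below).

-- ===== PORT A =====
-- Loop state: Python's (minimum_diff, minimum_pair) starts as (inf, ()); modelled as
-- Option (Int × Int × Int) — none = "no pair found yet" (diff = inf), some (d, p) afterwards.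
-- pyGetD with default 0 is exact here: every index i, i+1 read by the loop is in range.
def get_minimum_pair_sort_sets (arr1 : List Int) (arr2 : List Int) : Int × Int :=
  let all_values := PySem.List.sorted (arr1 ++ arr2) (fun x => x) false
  let arr1_values := PySem.Set.ofList arr1
  let arr2_values := PySem.Set.ofList arr2
  let n : Int := all_values.length
  let st := (PySem.List.pyRange 0 (n - 1) 1).foldl (fun st i =>
    let curr_value := PySem.List.pyGetD all_values i 0
    let next_value := PySem.List.pyGetD all_values (i + 1) 0
    if PySem.Set.contains arr1_values curr_value && PySem.Set.contains arr2_values next_value then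
      let curr_diff := |curr_value - next_value|
      match st with
      | none => some (curr_diff, curr_value, next_value)
      | some (minimum_diff, minimum_pair) =>
        if curr_diff < minimum_diff then some (curr_diff, curr_value, next_value)
        else some (minimum_diff, minimum_pair)
    else st) none
  match st with
  | some (_, p) => p
  | none => (0, 0)  -- Python returns the empty tuple () here; excluded by Pre_

-- ===== PORT B =====
-- Source B's _ceil_index: binary search for the first index idx with xs[idx] >= a (bisect_left).
def pvCeilIndex (xs : List Int) (a : Int) (lo hi : Nat) : Nat :=
  if lo < hi then
    let mid := (lo + hi) / 2
    if PySem.List.pyGetD xs (Int.ofNat mid) 0 < a then pvCeilIndex xs a (mid + 1) hi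
    else pvCeilIndex xs a lo mid
  else lo
termination_by hi - lo
decreasing_by all_goals omega

def get_minimum_pair_sort_sets_alt (arr1 : List Int) (arr2 : List Int) : Int × Int :=
  let arr2_sorted := PySem.List.sorted arr2 (fun x => x) false
  let st := (PySem.List.sorted arr1 (fun x => x) false).foldl (fun st a =>
    let idx := pvCeilIndex arr2_sorted a 0 arr2_sorted.length
    if idx < arr2_sorted.length then
      let b := PySem.List.pyGetD arr2_sorted (Int.ofNat idx) 0
      let diff := b - a
      match st with
      | none => some (diff, a, b)
      | some (minimum_diff, minimum_pair) =>
        if diff < minimum_diff then some (diff, a, b)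
        else some (minimum_diff, minimum_pair)
    else st) none
  match st with
  | some (_, p) => p
  | none => (0, 0)  -- Python returns the empty tuple () here; excluded by Pre_

-- ===== PRECONDITION & SPEC =====
-- Pre_ excludes exactly the inputs with no pair a ∈ arr1, b ∈ arr2, a ≤ b: there the Python A
-- (and B alike) returns the empty tuple (), which is not a value of the declared type Int × Int.
def Pre_get_minimum_pair_sort_sets (arr1 : List Int) (arr2 : List Int) : Prop :=
  ∃ a ∈ arr1, ∃ b ∈ arr2, a ≤ b
instance (arr1 : List Int) (arr2 : List Int) : Decidable (Pre_get_minimum_pair_sort_sets arr1 arr2) := by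
  unfold Pre_get_minimum_pair_sort_sets; infer_instance
def pvWitness_get_minimum_pair_sort_sets : List Int × List Int := ([1], [2])

def Spec_get_minimum_pair_sort_sets (arr1 : List Int) (arr2 : List Int) (out : Int × Int) : Prop := out = get_minimum_pair_sort_sets_alt arr1 arr2
instance (arr1 : List Int) (arr2 : List Int) (out : Int × Int) : Decidable (Spec_get_minimum_pair_sort_sets arr1 arr2 out) := by unfold Spec_get_minimum_pair_sort_sets; infer_instance

-- ===== CLAIM (what is proved, stated in full; the proofs are below) =====
def Claim_equal_get_minimum_pair_sort_sets : Prop := ∀ (arr1 : List Int) (arr2 : List Int), Dom_get_minimum_pair_sort_sets arr1 arr2 → Pre_get_minimum_pair_sort_sets arr1 arr2 → Spec_get_minimum_pair_sort_sets arr1 arr2 (get_minimum_pair_sort_sets arr1 arr2)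

-- ===== LEMMAS AND PROOFS =====

-- The common "keep the first strict minimum of b - a" loop step, and a structural reference
-- version pvFMin (front element wins ties) that both folds are reduced to.
def pvStep (st : Option (Int × Int × Int)) (p : Int × Int) : Option (Int × Int × Int) :=
  match st with
  | none => some (p.2 - p.1, p)
  | some (md, q) => if p.2 - p.1 < md then some (p.2 - p.1, p) else some (md, q)

def pvFMin : List (Int × Int) → Option (Int × Int × Int)
  | [] => none
  | p :: rest =>
    match pvFMin rest with
    | none => some (p.2 - p.1, p)
    | some (d, q) => if p.2 - p.1 ≤ d then some (p.2 - p.1, p) else some (d, q)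

def pvJoin : Option (Int × Int × Int) → Int → (Int × Int) → Option (Int × Int × Int)
  | none, d0, q0 => some (d0, q0)
  | some (d, q), d0, q0 => if d < d0 then some (d, q) else some (d0, q0)

lemma pvFoldl_some (l : List (Int × Int)) : ∀ d0 q0,
    l.foldl pvStep (some (d0, q0)) = pvJoin (pvFMin l) d0 q0 := by
  induction l with
  | nil => intros; rfl
  | cons p rest ih =>
    intro d0 q0
    rcases hr : pvFMin rest with _ | ⟨d, q⟩
    · have h1 : pvFMin (p :: rest) = some (p.2 - p.1, p) := by
        simp only [pvFMin, hr]
      by_cases h : p.2 - p.1 < d0 <;>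
        simp only [List.foldl_cons, pvStep, h, if_true, if_false, ih, hr,
          h1, pvJoin] <;> split_ifs <;> first | rfl | omega
    · by_cases hc : p.2 - p.1 ≤ d
      · have h1 : pvFMin (p :: rest) = some (p.2 - p.1, p) := by
          simp only [pvFMin, hr]; rw [if_pos hc]
        by_cases h : p.2 - p.1 < d0 <;>
          simp only [List.foldl_cons, pvStep, h, if_true, if_false, ih, hr,
            h1, pvJoin] <;> split_ifs <;> first | rfl | omega
      · have h1 : pvFMin (p :: rest) = some (d, q) := by
          simp only [pvFMin, hr]; rw [if_neg hc]
        by_cases h : p.2 - p.1 < d0 <;>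
          simp only [List.foldl_cons, pvStep, h, if_true, if_false, ih, hr,
            h1, pvJoin] <;> split_ifs <;> first | rfl | omega

lemma pvFoldl_none (l : List (Int × Int)) : l.foldl pvStep none = pvFMin l := by
  cases l with
  | nil => rfl
  | cons p rest =>
    rw [List.foldl_cons]
    show List.foldl pvStep (some (p.2 - p.1, p)) rest = _
    rw [pvFoldl_some]
    rcases hr : pvFMin rest with _ | ⟨d, q⟩ <;>
      simp only [pvFMin, pvJoin, hr] <;> split_ifs <;> first | rfl | omega

lemma pvFMin_none_iff (l : List (Int × Int)) : pvFMin l = none ↔ l = [] := by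
  cases l with
  | nil => simp [pvFMin]
  | cons p rest =>
    simp only [pvFMin]
    rcases pvFMin rest with _ | ⟨d, q⟩ <;> simp
    split <;> simp

lemma pvFMin_mem : ∀ (l : List (Int × Int)) (d : Int) (q : Int × Int),
    pvFMin l = some (d, q) → q ∈ l ∧ d = q.2 - q.1 := by
  intro l
  induction l with
  | nil => intro d q h; simp [pvFMin] at h
  | cons p rest ih =>
    intro d q h
    rcases hr : pvFMin rest with _ | ⟨d', q'⟩
    · rw [show pvFMin (p :: rest) = some (p.2 - p.1, p) by simp only [pvFMin, hr]] at h
      injection h with h'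
      have hd : p.2 - p.1 = d := congrArg Prod.fst h'
      have hq : p = q := congrArg Prod.snd h'
      subst hq
      exact ⟨List.mem_cons_self .., hd.symm⟩
    · by_cases hc : p.2 - p.1 ≤ d'
      · rw [show pvFMin (p :: rest) = some (p.2 - p.1, p) by
            simp only [pvFMin, hr]; rw [if_pos hc]] at h
        injection h with h'
        have hd : p.2 - p.1 = d := congrArg Prod.fst h'
        have hq : p = q := congrArg Prod.snd h'
        subst hq
        exact ⟨List.mem_cons_self .., hd.symm⟩
      · rw [show pvFMin (p :: rest) = some (d', q') by
            simp only [pvFMin, hr]; rw [if_neg hc]] at h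
        injection h with h'
        have hd : d' = d := congrArg Prod.fst h'
        have hq : q' = q := congrArg Prod.snd h'
        obtain ⟨hm, he⟩ := ih d q (by rw [hr, hd, hq])
        exact ⟨List.mem_cons_of_mem _ hm, he⟩

lemma pvFMin_min : ∀ (l : List (Int × Int)) (d : Int) (q : Int × Int),
    pvFMin l = some (d, q) → ∀ p ∈ l, d ≤ p.2 - p.1 := by
  intro l
  induction l with
  | nil => intro d q h; simp [pvFMin] at h
  | cons p rest ih =>
    intro d q h r hrmem
    rcases hr : pvFMin rest with _ | ⟨d', q'⟩
    · have hrest : rest = [] := (pvFMin_none_iff rest).mp hr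
      subst hrest
      rw [show pvFMin [p] = some (p.2 - p.1, p) from rfl] at h
      injection h with h'
      have hd : p.2 - p.1 = d := congrArg Prod.fst h'
      simp only [List.mem_singleton] at hrmem
      subst hrmem
      omega
    · have hmin' := ih d' q' hr
      by_cases hc : p.2 - p.1 ≤ d'
      · rw [show pvFMin (p :: rest) = some (p.2 - p.1, p) by
            simp only [pvFMin, hr]; rw [if_pos hc]] at h
        injection h with h'
        have hd : p.2 - p.1 = d := congrArg Prod.fst h'
        rcases List.mem_cons.mp hrmem with h1 | h1
        · subst h1; omega
        · have := hmin' r h1; omega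
      · rw [show pvFMin (p :: rest) = some (d', q') by
            simp only [pvFMin, hr]; rw [if_neg hc]] at h
        injection h with h'
        have hd : d' = d := congrArg Prod.fst h'
        rcases List.mem_cons.mp hrmem with h1 | h1
        · subst h1; omega
        · have := hmin' r h1; omega

lemma pvFMin_first : ∀ (l : List (Int × Int)) (d : Int) (q : Int × Int),
    l.Pairwise (fun p r => p.1 ≤ r.1) → pvFMin l = some (d, q) →
    ∀ p ∈ l, p.1 < q.1 → d < p.2 - p.1 := by
  intro l
  induction l with
  | nil => intro d q _ h; simp [pvFMin] at h
  | cons p rest ih =>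
    intro d q hpw h r hrmem hlt
    obtain ⟨hp, hpw'⟩ := List.pairwise_cons.mp hpw
    rcases hr : pvFMin rest with _ | ⟨d', q'⟩
    · have hrest : rest = [] := (pvFMin_none_iff rest).mp hr
      subst hrest
      rw [show pvFMin [p] = some (p.2 - p.1, p) from rfl] at h
      injection h with h'
      have hq : p = q := congrArg Prod.snd h'
      simp only [List.mem_singleton] at hrmem
      subst hrmem; subst hq
      omega
    · by_cases hc : p.2 - p.1 ≤ d'
      · rw [show pvFMin (p :: rest) = some (p.2 - p.1, p) by
            simp only [pvFMin, hr]; rw [if_pos hc]] at h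
        injection h with h'
        have hq : p = q := congrArg Prod.snd h'
        subst hq
        rcases List.mem_cons.mp hrmem with h1 | h1
        · subst h1; omega
        · have := hp r h1; omega
      · rw [show pvFMin (p :: rest) = some (d', q') by
            simp only [pvFMin, hr]; rw [if_neg hc]] at h
        injection h with h'
        have hd : d' = d := congrArg Prod.fst h'
        have hq : q' = q := congrArg Prod.snd h'
        rcases List.mem_cons.mp hrmem with h1 | h1
        · subst h1; omega
        · exact hd ▸ ih d' q' hpw' hr r h1 (by rw [hq]; exact hlt)

lemma pvFMin_construct (q : Int × Int) : ∀ (l1 l2 : List (Int × Int)),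
    (∀ p ∈ l1, q.2 - q.1 < p.2 - p.1) → (∀ p ∈ l2, q.2 - q.1 ≤ p.2 - p.1) →
    pvFMin (l1 ++ q :: l2) = some (q.2 - q.1, q) := by
  intro l1
  induction l1 with
  | nil =>
    intro l2 _ h2
    rcases hr : pvFMin l2 with _ | ⟨d', q'⟩
    · show pvFMin (q :: l2) = _
      simp only [pvFMin, hr]
    · obtain ⟨hm, hd⟩ := pvFMin_mem l2 d' q' hr
      have := h2 q' hm
      show pvFMin (q :: l2) = _
      simp only [pvFMin, hr]
      rw [if_pos (by omega)]
  | cons p t ih =>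
    intro l2 h1 h2
    have hih := ih l2 (fun r hr => h1 r (List.mem_cons_of_mem _ hr)) h2
    show pvFMin (p :: (t ++ q :: l2)) = _
    simp only [pvFMin, hih]
    rw [if_neg (by have := h1 p (List.mem_cons_self ..); omega)]

lemma pvFirstSplit {α : Type} (l : List α) (x : α) (h : x ∈ l) :
    ∃ l1 l2, l = l1 ++ x :: l2 ∧ x ∉ l1 := by
  induction l with
  | nil => simp at h
  | cons y rest ih =>
    by_cases hxy : x = y
    · exact ⟨[], rest, by simp [hxy], by simp⟩
    · rcases List.mem_cons.mp h with h1 | h1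
      · exact absurd h1 hxy
      · obtain ⟨l1, l2, heq, hnot⟩ := ih h1
        exact ⟨y :: l1, l2, by simp [heq], by simp [hxy, hnot]⟩

-- ===== adjacency pairs of a sorted list =====

lemma pvZip_mem : ∀ (M : List Int), M.Pairwise (· ≤ ·) →
    ∀ p ∈ M.zip M.tail, p.1 ∈ M ∧ p.2 ∈ M ∧ p.1 ≤ p.2 := by
  intro M
  induction M with
  | nil => intro _ p hp; simp at hp
  | cons x rest ih =>
    intro hpw p hp
    obtain ⟨hx, hpw'⟩ := List.pairwise_cons.mp hpw
    cases rest with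
    | nil => simp at hp
    | cons y t =>
      rw [show (x :: y :: t).tail = y :: t from rfl, List.zip_cons_cons] at hp
      rcases List.mem_cons.mp hp with h1 | h1
      · subst h1
        exact ⟨List.mem_cons_self .., List.mem_cons_of_mem _ (List.mem_cons_self ..),
          hx y (List.mem_cons_self ..)⟩
      · obtain ⟨h2, h3, h4⟩ := ih hpw' p h1
        exact ⟨List.mem_cons_of_mem _ h2, List.mem_cons_of_mem _ h3, h4⟩

lemma pvZip_pairwise : ∀ (M : List Int), M.Pairwise (· ≤ ·) →
    (M.zip M.tail).Pairwise (fun p r : Int × Int => p.1 ≤ r.1) := by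
  intro M
  induction M with
  | nil => intro _; simp
  | cons x rest ih =>
    intro hpw
    obtain ⟨hx, hpw'⟩ := List.pairwise_cons.mp hpw
    cases rest with
    | nil => simp
    | cons y t =>
      rw [show (x :: y :: t).tail = y :: t from rfl, List.zip_cons_cons]
      refine List.pairwise_cons.mpr ⟨?_, ih hpw'⟩
      intro r hr
      have h1 : r.1 ∈ y :: t := by
        have := List.of_mem_zip (show (r.1, r.2) ∈ (y :: t).zip ((y :: t).tail) from hr)
        exact this.1
      exact hx r.1 h1

lemma pvAdj_lt : ∀ (M : List Int), M.Pairwise (· ≤ ·) → ∀ x y : Int, x ∈ M → y ∈ M → x < y →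
    (∀ z ∈ M, ¬(x < z ∧ z < y)) → (x, y) ∈ M.zip M.tail := by
  intro M
  induction M with
  | nil => intro _ x y hx; simp at hx
  | cons m rest ih =>
    intro hpw x y hx hy hxy hnb
    obtain ⟨hm, hpw'⟩ := List.pairwise_cons.mp hpw
    have hyrest : y ∈ rest := by
      rcases List.mem_cons.mp hy with h | h
      · exfalso
        rcases List.mem_cons.mp hx with h2 | h2
        · omega
        · have := hm x h2; omega
      · exact h
    cases rest with
    | nil => simp at hyrest
    | cons h t =>
      rw [show (m :: h :: t).tail = h :: t from rfl, List.zip_cons_cons]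
      by_cases hxr : x ∈ h :: t
      · exact List.mem_cons_of_mem _
          (ih hpw' x y hxr hyrest hxy (fun z hz => hnb z (List.mem_cons_of_mem _ hz)))
      · have hxm : x = m := by
          rcases List.mem_cons.mp hx with h2 | h2
          · exact h2
          · exact absurd h2 hxr
        subst hxm
        have hh : x ≤ h := hm h (List.mem_cons_self ..)
        by_cases hhy : h = y
        · subst hhy; exact List.mem_cons_self ..
        · exfalso
          have hhy2 : h ≤ y := by
            rcases List.mem_cons.mp hyrest with h2 | h2
            · omega
            · exact (List.pairwise_cons.mp hpw').1 y h2
          have hxh : x ≠ h := fun he => hxr (he ▸ List.mem_cons_self ..)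
          exact hnb h (List.mem_cons_of_mem _ (List.mem_cons_self ..)) ⟨by omega, by omega⟩

lemma pvAdj_eq : ∀ (M : List Int), M.Pairwise (· ≤ ·) → ∀ x : Int,
    2 ≤ M.count x → (x, x) ∈ M.zip M.tail := by
  intro M
  induction M with
  | nil => intro _ x hc; simp at hc
  | cons m rest ih =>
    intro hpw x hc
    obtain ⟨hm, hpw'⟩ := List.pairwise_cons.mp hpw
    by_cases h2 : 2 ≤ rest.count x
    · have hmem := ih hpw' x h2
      have hne : rest ≠ [] := by
        intro he; rw [he] at h2; simp at h2
      cases rest with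
      | nil => exact absurd rfl hne
      | cons h t =>
        rw [show (m :: h :: t).tail = h :: t from rfl, List.zip_cons_cons]
        exact List.mem_cons_of_mem _ hmem
    · have hmx : m = x := by
        by_contra hne
        rw [List.count_cons] at hc
        simp only [beq_iff_eq] at hc
        rw [if_neg hne] at hc
        omega
      have hcx : x ∈ rest := by
        rw [List.count_cons] at hc
        simp only [beq_iff_eq] at hc
        have : 1 ≤ rest.count x := by split at hc <;> omega
        exact List.count_pos_iff.mp (by omega)
      cases rest with
      | nil => simp at hcx
      | cons h t =>
        have hxh : h = x := by
          have h1 : m ≤ h := hm h (List.mem_cons_self ..)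
          rcases List.mem_cons.mp hcx with hh | hh
          · omega
          · have := (List.pairwise_cons.mp hpw').1 x hh; omega
        rw [show (m :: h :: t).tail = h :: t from rfl, List.zip_cons_cons, hmx, hxh]
        exact List.mem_cons_self ..

-- ===== binary search correctness =====

lemma pvCeilIndex_spec (xs : List Int) (a : Int) (hpw : xs.Pairwise (· ≤ ·)) :
    ∀ n lo hi, hi - lo = n → lo ≤ hi → hi ≤ xs.length →
    (∀ j (hj : j < xs.length), j < lo → xs[j] < a) →
    (∀ j (hj : j < xs.length), hi ≤ j → a ≤ xs[j]) →
    (∀ j (hj : j < xs.length), j < pvCeilIndex xs a lo hi → xs[j] < a) ∧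
    (∀ j (hj : j < xs.length), pvCeilIndex xs a lo hi ≤ j → a ≤ xs[j]) ∧
    pvCeilIndex xs a lo hi ≤ hi ∧ lo ≤ pvCeilIndex xs a lo hi := by
  intro n
  induction n using Nat.strong_induction_on with
  | _ n ih =>
    intro lo hi hn hlohi hhi hlow hhigh
    rw [pvCeilIndex]
    by_cases h : lo < hi
    · rw [if_pos h]
      have hmid : (lo + hi) / 2 < xs.length := by omega
      have hget : PySem.List.pyGetD xs (Int.ofNat ((lo + hi) / 2)) 0 = xs[(lo + hi) / 2] := by
        rw [show Int.ofNat ((lo + hi) / 2) = ((lo + hi) / 2 : Nat) from rfl,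
          PySem.List.pyGetD_natCast, List.getD_eq_getElem _ _ hmid]
      by_cases hlt : xs[(lo + hi) / 2] < a
      · rw [if_pos (by rw [hget]; exact hlt)]
        have hnewlow : ∀ j (hj : j < xs.length), j < (lo + hi) / 2 + 1 → xs[j] < a := by
          intro j hj hjlt
          rcases Nat.lt_or_ge j ((lo + hi) / 2) with hcase | hcase
          · exact lt_of_le_of_lt (List.pairwise_iff_getElem.mp hpw j _ hj hmid hcase) hlt
          · have : j = (lo + hi) / 2 := by omega
            subst this; exact hlt
        obtain ⟨A1, A2, A3, _⟩ := ih (hi - ((lo + hi) / 2 + 1)) (by omega) ((lo + hi) / 2 + 1) hi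
          rfl (by omega) hhi hnewlow hhigh
        exact ⟨A1, A2, A3, by omega⟩
      · rw [if_neg (by rw [hget]; exact hlt)]
        have hnewhigh : ∀ j (hj : j < xs.length), (lo + hi) / 2 ≤ j → a ≤ xs[j] := by
          intro j hj hjge
          have hma : a ≤ xs[(lo + hi) / 2] := by omega
          rcases Nat.eq_or_lt_of_le hjge with he | hl
          · exact le_trans hma (le_of_eq (by congr 1))
          · exact le_trans hma (List.pairwise_iff_getElem.mp hpw _ j hmid hj hl)
        obtain ⟨A1, A2, _, A4⟩ := ih ((lo + hi) / 2 - lo) (by omega) lo ((lo + hi) / 2)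
          rfl (by omega) (by omega) hlow hnewhigh
        exact ⟨A1, A2, by omega, A4⟩
    · rw [if_neg h]
      exact ⟨fun j hj hjlt => hlow j hj hjlt, fun j hj hjge => hhigh j hj (by omega),
        by omega, le_refl lo⟩

-- ===== reduction of the two ports to pvFMin over candidate lists =====

def pvM (arr1 arr2 : List Int) : List Int := PySem.List.sorted (arr1 ++ arr2) (fun x => x) false
def pvS2 (arr2 : List Int) : List Int := PySem.List.sorted arr2 (fun x => x) false

def pvListA (arr1 arr2 : List Int) : List (Int × Int) :=
  ((pvM arr1 arr2).zip (pvM arr1 arr2).tail).filter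
    (fun p => PySem.Set.contains (PySem.Set.ofList arr1) p.1 &&
              PySem.Set.contains (PySem.Set.ofList arr2) p.2)

def pvCond (arr2 : List Int) (a : Int) : Bool :=
  pvCeilIndex (pvS2 arr2) a 0 (pvS2 arr2).length < (pvS2 arr2).length

def pvCeilVal (arr2 : List Int) (a : Int) : Int :=
  PySem.List.pyGetD (pvS2 arr2) (Int.ofNat (pvCeilIndex (pvS2 arr2) a 0 (pvS2 arr2).length)) 0

def pvListB (arr1 arr2 : List Int) : List (Int × Int) :=
  ((PySem.List.sorted arr1 (fun x => x) false).filter (pvCond arr2)).map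
    (fun a => (a, pvCeilVal arr2 a))

lemma pvRangeZip {β : Type} (f : β → Int → Int → β) :
    ∀ (M : List Int) (st : β), (List.range (M.length - 1)).foldl
      (fun st k => f st (M.getD k 0) (M.getD (k + 1) 0)) st
    = (M.zip M.tail).foldl (fun st p => f st p.1 p.2) st := by
  intro M
  induction M with
  | nil => intro st; rfl
  | cons x rest ih =>
    intro st
    cases rest with
    | nil => rfl
    | cons y t =>
      have hlen : (x :: y :: t).length - 1 = t.length + 1 := by simp
      rw [hlen, List.range_succ_eq_map, List.foldl_cons, List.foldl_map]
      rw [show (x :: y :: t).zip (x :: y :: t).tail = (x, y) :: ((y :: t).zip t) from rfl,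
        List.foldl_cons]
      have ih' := ih (f st ((x :: y :: t).getD 0 0) ((x :: y :: t).getD 1 0))
      simp only [List.length_cons, Nat.add_sub_cancel] at ih'
      exact ih'

def pvBodyAbs (c : Int × Int → Bool) (st : Option (Int × Int × Int)) (curr next : Int) :
    Option (Int × Int × Int) :=
  if c (curr, next) then
    match st with
    | none => some (|curr - next|, curr, next)
    | some (md, q) => if |curr - next| < md then some (|curr - next|, curr, next) else some (md, q)
  else st

def pvStepAbs (st : Option (Int × Int × Int)) (p : Int × Int) : Option (Int × Int × Int) :=
  match st with
  | none => some (|p.1 - p.2|, p)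
  | some (md, q) => if |p.1 - p.2| < md then some (|p.1 - p.2|, p) else some (md, q)

lemma pvAbsFold (M : List Int) (c : Int × Int → Bool) (hpw : M.Pairwise (· ≤ ·)) :
    (PySem.List.pyRange 0 ((M.length : Int) - 1) 1).foldl
      (fun st i =>
        if c (PySem.List.pyGetD M i 0, PySem.List.pyGetD M (i + 1) 0) then
          match st with
          | none => some (|PySem.List.pyGetD M i 0 - PySem.List.pyGetD M (i + 1) 0|,
              PySem.List.pyGetD M i 0, PySem.List.pyGetD M (i + 1) 0)
          | some (md, q) =>
            if |PySem.List.pyGetD M i 0 - PySem.List.pyGetD M (i + 1) 0| < md then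
              some (|PySem.List.pyGetD M i 0 - PySem.List.pyGetD M (i + 1) 0|,
                PySem.List.pyGetD M i 0, PySem.List.pyGetD M (i + 1) 0)
            else some (md, q)
        else st) none
    = pvFMin ((M.zip M.tail).filter c) := by
  rw [PySem.List.pyRange_one]
  rw [show (((M.length : Int) - 1) - 0).toNat = M.length - 1 by omega]
  rw [List.foldl_map]
  have hcast : ∀ (st : Option (Int × Int × Int)) (k : Nat),
      (fun st (i : Int) =>
        if c (PySem.List.pyGetD M i 0, PySem.List.pyGetD M (i + 1) 0) then
          match st with
          | none => some (|PySem.List.pyGetD M i 0 - PySem.List.pyGetD M (i + 1) 0|,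
              PySem.List.pyGetD M i 0, PySem.List.pyGetD M (i + 1) 0)
          | some (md, q) =>
            if |PySem.List.pyGetD M i 0 - PySem.List.pyGetD M (i + 1) 0| < md then
              some (|PySem.List.pyGetD M i 0 - PySem.List.pyGetD M (i + 1) 0|,
                PySem.List.pyGetD M i 0, PySem.List.pyGetD M (i + 1) 0)
            else some (md, q)
        else st) st (0 + (k : Int))
      = pvBodyAbs c st (M.getD k 0) (M.getD (k + 1) 0) := by
    intro st k
    have h1 : (0 + (k : Int)) = ((k : Nat) : Int) := by omega
    have h2 : ((k : Int) + 1) = (((k + 1 : Nat)) : Int) := by omega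
    simp only [h1, h2, PySem.List.pyGetD_natCast]
    rfl
  simp only [hcast]
  rw [pvRangeZip (pvBodyAbs c) M none]
  rw [show (fun (st : Option (Int × Int × Int)) (p : Int × Int) => pvBodyAbs c st p.1 p.2)
      = (fun st p => if c p then pvStepAbs st p else st) by
    funext st p
    show pvBodyAbs c st p.1 p.2 = _
    rfl]
  rw [PySem.List.foldl_if_eq_foldl_filter c pvStepAbs]
  rw [PySem.List.foldl_congr_mem ((M.zip M.tail).filter c) pvStepAbs pvStep none ?_]
  · exact pvFoldl_none _
  · intro acc p hp
    have hmem := List.mem_of_mem_filter hp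
    obtain ⟨_, _, hle⟩ := pvZip_mem M hpw p hmem
    have habs : |p.1 - p.2| = p.2 - p.1 := by rw [abs_sub_comm]; exact abs_of_nonneg (by omega)
    rcases acc with _ | ⟨md, q⟩ <;> simp only [pvStepAbs, pvStep, habs]

lemma pvPortA_eq (arr1 arr2 : List Int) :
    get_minimum_pair_sort_sets arr1 arr2 =
      match pvFMin (pvListA arr1 arr2) with
      | some (_, p) => p
      | none => (0, 0) := by
  have h := pvAbsFold (pvM arr1 arr2)
    (fun p => PySem.Set.contains (PySem.Set.ofList arr1) p.1 &&
              PySem.Set.contains (PySem.Set.ofList arr2) p.2)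
    (PySem.List.sorted_pairwise (arr1 ++ arr2) (fun x => x))
  simp only [get_minimum_pair_sort_sets]
  exact congrArg (fun r => (match r with
    | some (_, p) => p
    | none => (0, 0) : Int × Int)) h

lemma pvPortB_eq (arr1 arr2 : List Int) :
    get_minimum_pair_sort_sets_alt arr1 arr2 =
      match pvFMin (pvListB arr1 arr2) with
      | some (_, p) => p
      | none => (0, 0) := by
  have h : (PySem.List.sorted arr1 (fun x => x) false).foldl
      (fun st a =>
        if pvCeilIndex (PySem.List.sorted arr2 (fun x => x) false) a 0
            (PySem.List.sorted arr2 (fun x => x) false).length <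
            (PySem.List.sorted arr2 (fun x => x) false).length then
          pvStep st (a, pvCeilVal arr2 a)
        else st) none = pvFMin (pvListB arr1 arr2) := by
    rw [pvListB, ← pvFoldl_none, List.foldl_map,
      show pvCond arr2 = (fun a => decide (pvCeilIndex (pvS2 arr2) a 0 (pvS2 arr2).length <
        (pvS2 arr2).length)) from rfl,
      ← PySem.List.foldl_ite_eq_foldl_filter
        (fun a => pvCeilIndex (pvS2 arr2) a 0 (pvS2 arr2).length < (pvS2 arr2).length)
        (fun st a => pvStep st (a, pvCeilVal arr2 a))]
    rfl
  simp only [get_minimum_pair_sort_sets_alt]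
  rw [PySem.List.foldl_congr_mem _ _ (fun st (a : Int) =>
      if pvCeilIndex (PySem.List.sorted arr2 (fun x => x) false) a 0
          (PySem.List.sorted arr2 (fun x => x) false).length <
          (PySem.List.sorted arr2 (fun x => x) false).length then
        pvStep st (a, pvCeilVal arr2 a)
      else st) none ?_, h]
  · rfl
  · intro acc x _
    rcases acc with _ | ⟨md, q⟩ <;> rfl

-- derived facts about the binary-search ceiling on the sorted arr2

lemma pvCeil_base (arr2 : List Int) (a : Int) :
    (∀ j (hj : j < (pvS2 arr2).length), j < pvCeilIndex (pvS2 arr2) a 0 (pvS2 arr2).length →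
      (pvS2 arr2)[j] < a) ∧
    (∀ j (hj : j < (pvS2 arr2).length), pvCeilIndex (pvS2 arr2) a 0 (pvS2 arr2).length ≤ j →
      a ≤ (pvS2 arr2)[j]) ∧
    pvCeilIndex (pvS2 arr2) a 0 (pvS2 arr2).length ≤ (pvS2 arr2).length ∧
    0 ≤ pvCeilIndex (pvS2 arr2) a 0 (pvS2 arr2).length := by
  exact pvCeilIndex_spec (pvS2 arr2) a (PySem.List.sorted_pairwise arr2 (fun x => x))
    ((pvS2 arr2).length) 0 ((pvS2 arr2).length) rfl (Nat.zero_le _) (le_refl _)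
    (fun j hj h0 => absurd h0 (Nat.not_lt_zero j))
    (fun j hj hge => absurd hj (by omega))

lemma pvCond_true_iff (arr2 : List Int) (a : Int) :
    pvCond arr2 a = true ↔ ∃ b ∈ arr2, a ≤ b := by
  obtain ⟨C1, C2, C3, _⟩ := pvCeil_base arr2 a
  simp only [pvCond, decide_eq_true_eq]
  constructor
  · intro hK
    refine ⟨(pvS2 arr2)[pvCeilIndex (pvS2 arr2) a 0 (pvS2 arr2).length], ?_, ?_⟩
    · exact (PySem.List.mem_sorted arr2 (fun x => x) false _).mp (List.getElem_mem hK)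
    · exact C2 _ hK (le_refl _)
  · rintro ⟨b, hb, hab⟩
    by_contra hK
    have hbmem : b ∈ pvS2 arr2 := (PySem.List.mem_sorted arr2 (fun x => x) false b).mpr hb
    obtain ⟨j, hj, hjb⟩ := List.mem_iff_getElem.mp hbmem
    have : (pvS2 arr2)[j] < a := C1 j hj (by omega)
    omega

lemma pvCeilVal_spec (arr2 : List Int) (a : Int) (h : pvCond arr2 a = true) :
    pvCeilVal arr2 a ∈ arr2 ∧ a ≤ pvCeilVal arr2 a ∧
    ∀ b ∈ arr2, a ≤ b → pvCeilVal arr2 a ≤ b := by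
  obtain ⟨C1, C2, C3, _⟩ := pvCeil_base arr2 a
  simp only [pvCond, decide_eq_true_eq] at h
  have hval : pvCeilVal arr2 a = (pvS2 arr2)[pvCeilIndex (pvS2 arr2) a 0 (pvS2 arr2).length] := by
    rw [pvCeilVal, show Int.ofNat (pvCeilIndex (pvS2 arr2) a 0 (pvS2 arr2).length) =
      ((pvCeilIndex (pvS2 arr2) a 0 (pvS2 arr2).length : Nat) : Int) from rfl,
      PySem.List.pyGetD_natCast, List.getD_eq_getElem _ _ h]
  refine ⟨?_, ?_, ?_⟩
  · rw [hval]
    exact (PySem.List.mem_sorted arr2 (fun x => x) false _).mp (List.getElem_mem h)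
  · rw [hval]; exact C2 _ h (le_refl _)
  · intro b hb hab
    have hbmem : b ∈ pvS2 arr2 := (PySem.List.mem_sorted arr2 (fun x => x) false b).mpr hb
    obtain ⟨j, hj, hjb⟩ := List.mem_iff_getElem.mp hbmem
    have hKj : pvCeilIndex (pvS2 arr2) a 0 (pvS2 arr2).length ≤ j := by
      by_contra hlt
      have := C1 j hj (by omega)
      omega
    rw [hval, ← hjb]
    rcases Nat.eq_or_lt_of_le hKj with he | hl
    · exact le_of_eq (by congr 1)
    · exact List.pairwise_iff_getElem.mp (PySem.List.sorted_pairwise arr2 (fun x => x)) _ j h hj hl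

lemma pvListB_mem (arr1 arr2 : List Int) (a : Int) (ha : a ∈ arr1)
    (hc : pvCond arr2 a = true) : (a, pvCeilVal arr2 a) ∈ pvListB arr1 arr2 := by
  rw [pvListB]
  exact List.mem_map_of_mem (List.mem_filter.mpr
    ⟨(PySem.List.mem_sorted arr1 (fun x => x) false a).mpr ha, hc⟩)

lemma pvListA_mem_iff (arr1 arr2 : List Int) (p : Int × Int) :
    p ∈ pvListA arr1 arr2 ↔
      p ∈ (pvM arr1 arr2).zip (pvM arr1 arr2).tail ∧ p.1 ∈ arr1 ∧ p.2 ∈ arr2 := by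
  rw [pvListA, List.mem_filter, Bool.and_eq_true,
    PySem.Set.contains_iff, PySem.Set.contains_iff,
    PySem.Set.mem_ofList, PySem.Set.mem_ofList]

lemma pvMain (arr1 arr2 : List Int) (hpre : Pre_get_minimum_pair_sort_sets arr1 arr2) :
    pvFMin (pvListA arr1 arr2) = pvFMin (pvListB arr1 arr2) := by
  obtain ⟨a0, ha0, b0, hb0, hab0⟩ := hpre
  have hMpw : (pvM arr1 arr2).Pairwise (· ≤ ·) :=
    PySem.List.sorted_pairwise (arr1 ++ arr2) (fun x => x)
  have hMmem : ∀ z : Int, z ∈ pvM arr1 arr2 ↔ z ∈ arr1 ∨ z ∈ arr2 := by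
    intro z
    rw [pvM, PySem.List.mem_sorted, List.mem_append]
  -- B's first minimum exists
  rcases hfb : pvFMin (pvListB arr1 arr2) with _ | ⟨d, q⟩
  · exfalso
    have hmem := pvListB_mem arr1 arr2 a0 ha0 ((pvCond_true_iff arr2 a0).mpr ⟨b0, hb0, hab0⟩)
    rw [(pvFMin_none_iff _).mp hfb] at hmem
    simp at hmem
  obtain ⟨hqmem, hdq⟩ := pvFMin_mem _ _ _ hfb
  -- unpack the winner: q = (a*, ceil a*)
  obtain ⟨aq, haqf, haqe⟩ := List.mem_map.mp (by rw [pvListB] at hqmem; exact hqmem)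
  obtain ⟨haqs, hcondq⟩ := List.mem_filter.mp haqf
  have hq1 : q.1 = aq := by rw [← haqe]
  have hq2 : q.2 = pvCeilVal arr2 aq := by rw [← haqe]
  have haq1 : q.1 ∈ arr1 := by
    rw [hq1]; exact (PySem.List.mem_sorted arr1 (fun x => x) false aq).mp haqs
  obtain ⟨hceil_mem, hceil_ge, hceil_min⟩ := pvCeilVal_spec arr2 aq hcondq
  have haq2 : q.2 ∈ arr2 := by rw [hq2]; exact hceil_mem
  have hq12 : q.1 ≤ q.2 := by rw [hq1, hq2]; exact hceil_ge
  -- F2: d is a lower bound for every cross pair a ≤ b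
  have hF2 : ∀ a ∈ arr1, ∀ b ∈ arr2, a ≤ b → d ≤ b - a := by
    intro a ha b hb hab
    have hconda : pvCond arr2 a = true := (pvCond_true_iff arr2 a).mpr ⟨b, hb, hab⟩
    have hmin := pvFMin_min _ _ _ hfb _ (pvListB_mem arr1 arr2 a ha hconda)
    have hcb := (pvCeilVal_spec arr2 a hconda).2.2 b hb hab
    have hmin' : d ≤ pvCeilVal arr2 a - a := hmin
    omega
  -- pairwise first components of listB
  have hpwB : (pvListB arr1 arr2).Pairwise (fun p r : Int × Int => p.1 ≤ r.1) := by
    rw [pvListB]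
    exact List.pairwise_map.mpr
      (((PySem.List.sorted_pairwise arr1 (fun x => x)).filter (pvCond arr2)).imp (fun h => h))
  -- F3: strictly smaller a give strictly larger diffs
  have hF3 : ∀ a ∈ arr1, a < q.1 → ∀ b ∈ arr2, a ≤ b → d < b - a := by
    intro a ha halt b hb hab
    have hconda : pvCond arr2 a = true := (pvCond_true_iff arr2 a).mpr ⟨b, hb, hab⟩
    have hfirst := pvFMin_first _ _ _ hpwB hfb _ (pvListB_mem arr1 arr2 a ha hconda) halt
    have hcb := (pvCeilVal_spec arr2 a hconda).2.2 b hb hab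
    have hfirst' : d < pvCeilVal arr2 a - a := hfirst
    omega
  -- the winning pair is adjacent in the sorted merge
  have hnb : ∀ z ∈ pvM arr1 arr2, ¬(q.1 < z ∧ z < q.2) := by
    intro z hz ⟨hz1, hz2⟩
    rcases (hMmem z).mp hz with h1 | h1
    · have := hF2 z h1 q.2 haq2 (by omega)
      omega
    · have := hceil_min z h1 (by omega)
      rw [← hq2] at this
      omega
  have hzipmem : (q.1, q.2) ∈ (pvM arr1 arr2).zip (pvM arr1 arr2).tail := by
    rcases lt_or_eq_of_le hq12 with hlt | heq
    · exact pvAdj_lt (pvM arr1 arr2) hMpw q.1 q.2 ((hMmem q.1).mpr (Or.inl haq1))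
        ((hMmem q.2).mpr (Or.inr haq2)) hlt hnb
    · have hcount : 2 ≤ (pvM arr1 arr2).count q.1 := by
        have hperm := PySem.List.sorted_perm (arr1 ++ arr2) (fun x => x) false
        rw [pvM, hperm.count_eq, List.count_append]
        have h1 : 0 < arr1.count q.1 := List.count_pos_iff.mpr haq1
        have h2 : 0 < arr2.count q.1 := List.count_pos_iff.mpr (heq ▸ haq2)
        omega
      rw [← heq]
      exact pvAdj_eq (pvM arr1 arr2) hMpw q.1 hcount
  have hqA : q ∈ pvListA arr1 arr2 :=
    (pvListA_mem_iff arr1 arr2 q).mpr ⟨hzipmem, haq1, haq2⟩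
  -- every member of listA is a cross pair with diff ≥ d
  have hAfacts : ∀ p ∈ pvListA arr1 arr2, p.1 ∈ arr1 ∧ p.2 ∈ arr2 ∧ p.1 ≤ p.2 ∧ d ≤ p.2 - p.1 := by
    intro p hp
    obtain ⟨hzip, hp1, hp2⟩ := (pvListA_mem_iff arr1 arr2 p).mp hp
    obtain ⟨_, _, hle⟩ := pvZip_mem (pvM arr1 arr2) hMpw p hzip
    exact ⟨hp1, hp2, hle, hF2 p.1 hp1 p.2 hp2 hle⟩
  -- split listA at the first occurrence of q and compute its first minimum
  obtain ⟨L1, L2, hsplit, hnotin⟩ := pvFirstSplit _ q hqA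
  have hpwA : (pvListA arr1 arr2).Pairwise (fun p r : Int × Int => p.1 ≤ r.1) :=
    (pvZip_pairwise (pvM arr1 arr2) hMpw).filter _
  have hpwA' := hsplit ▸ hpwA
  have hL1 : ∀ p ∈ L1, q.2 - q.1 < p.2 - p.1 := by
    intro p hp
    have hpA : p ∈ pvListA arr1 arr2 := by rw [hsplit]; exact List.mem_append_left _ hp
    obtain ⟨hp1, hp2, hple, hpd⟩ := hAfacts p hpA
    have hple' : p.1 ≤ q.1 :=
      (List.pairwise_append.mp hpwA').2.2 p hp q (List.mem_cons_self ..)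
    rcases lt_or_eq_of_le hple' with hlt | heq
    · have := hF3 p.1 hp1 hlt p.2 hp2 hple
      omega
    · by_cases hd : p.2 - p.1 = d
      · exfalso
        have hp2e : p.2 = q.2 := by omega
        have : p = q := Prod.ext heq hp2e
        rw [this] at hp
        exact hnotin hp
      · omega
  have hL2 : ∀ p ∈ L2, q.2 - q.1 ≤ p.2 - p.1 := by
    intro p hp
    have hpA : p ∈ pvListA arr1 arr2 := by
      rw [hsplit]; exact List.mem_append_right _ (List.mem_cons_of_mem _ hp)
    obtain ⟨_, _, _, hpd⟩ := hAfacts p hpA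
    omega
  rw [hsplit, pvFMin_construct q L1 L2 hL1 hL2, hdq]

-- ===== VERDICT (by name: the statement is the Claim_ definition above) =====
theorem get_minimum_pair_sort_sets_spec : Claim_equal_get_minimum_pair_sort_sets := by
  intro arr1 arr2 _hdom hpre
  unfold Spec_get_minimum_pair_sort_sets
  rw [pvPortA_eq, pvPortB_eq, pvMain arr1 arr2 hpre]
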